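-- pv_equiv track=rewrite | github.com/Crocmagnon/advent-of-code | 2022/day08_trees.py | find_visible_in_rows
-- ===== SOURCE A (Python) =====
-- from collections.abc import Iterable
--
-- Tree = tuple[int, int]
--
-- def find_visible_in_rows(forest: Iterable[list[int]], swap: bool = False) -> set[Tree]:
--     visible = set()
--     for row, trees in enumerate(forest):
--         max_height = -1
--         for col, tree in enumerate(trees):
--             if tree > max_height:
--                 max_height = tree
--                 visible.add(visible_tree(row, col, swap))
--         max_height = -1
--         for col, tree in enumerate(reversed(trees)):
--             col = len(trees) - col - 1
--             if tree > max_height: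
--                 max_height = tree
--                 visible.add(visible_tree(row, col, swap))
--     return visible
--
-- def visible_tree(row: int, col: int, swap: bool) -> Tree:
--     if swap:
--         return col, row
--     else:
--         return row, col
-- ===== SOURCE B (Python) =====
-- def visible_tree(row, col, swap):
--     if swap:
--         return col, row
--     else:
--         return row, col
--
--
-- def find_visible_in_rows(forest, swap=False):
--     visible = set()
--     for row, trees in enumerate(forest):
--         n = len(trees)
--         # Definitional (brute-force) visibility test: a tree is visible from the
--         # left iff it beats every tree before it, from the right iff it beats
--         # every tree after it; the slice max is recomputed per column.
--         left = [col for col, tree in enumerate(trees)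
--                 if tree > max([-1] + trees[:col])]
--         right = [n - j - 1 for j, tree in enumerate(reversed(trees))
--                  if tree > max([-1] + trees[n - j:])]
--         for col in left + right:
--             visible.add(visible_tree(row, col, swap))
--     return visible
-- ===== Notes on version B (the rewrite author's own statement) =====
-- stated objective: alternative
-- what changed: Replaces A's two stateful running-maximum scans per row with the definitional brute-force visibility test: each column's bound is the max of its whole prefix (resp. suffix) slice recomputed per column, with the visible columns collected by list comprehensions and then added to the set.
import Mathlib
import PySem

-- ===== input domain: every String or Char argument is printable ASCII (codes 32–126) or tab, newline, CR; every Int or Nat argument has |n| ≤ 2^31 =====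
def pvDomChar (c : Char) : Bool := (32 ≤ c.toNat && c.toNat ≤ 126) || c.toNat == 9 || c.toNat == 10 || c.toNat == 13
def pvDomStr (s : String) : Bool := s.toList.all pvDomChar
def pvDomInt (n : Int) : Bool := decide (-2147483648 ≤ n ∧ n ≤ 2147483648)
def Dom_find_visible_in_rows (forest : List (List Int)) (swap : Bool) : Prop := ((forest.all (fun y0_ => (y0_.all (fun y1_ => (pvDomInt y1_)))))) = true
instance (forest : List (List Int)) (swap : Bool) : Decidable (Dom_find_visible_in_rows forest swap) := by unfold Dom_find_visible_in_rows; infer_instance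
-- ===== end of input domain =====

-- B replaces A's stateful running-maximum scans with the definitional brute-force test
-- (each tree compared against the max of its whole prefix/suffix slice, recomputed per
-- column, collected by comprehensions); same result, different algorithm (O(n^2) per row).

-- ===== PORT A =====
def visible_tree (row col : Int) (swap : Bool) : Int × Int :=
  if swap then (col, row) else (row, col)

def find_visible_in_rows (forest : List (List Int)) (swap : Bool) : List (Int × Int) :=
  (PySem.List.enumerate forest 0).foldl (fun visible rt =>
    let row := rt.1
    let trees := rt.2
    let s1 := ((PySem.List.enumerate trees 0).foldl
      (fun (st : Int × PySem.Set (Int × Int)) ct =>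
        if ct.2 > st.1 then (ct.2, st.2.add (visible_tree row ct.1 swap)) else st)
      (-1, visible)).2
    ((PySem.List.enumerate trees.reverse 0).foldl
      (fun (st : Int × PySem.Set (Int × Int)) ct =>
        let col := (trees.length : Int) - ct.1 - 1
        if ct.2 > st.1 then (ct.2, st.2.add (visible_tree row col swap)) else st)
      (-1, s1)).2)
    PySem.Set.empty

-- ===== PORT B =====
-- max(nonempty list); the argument always starts with -1, so the getD default is never used
def pyMaxNe (xs : List Int) : Int := (PySem.List.max? xs (fun x => x)).getD (-1)

def find_visible_in_rows_alt (forest : List (List Int)) (swap : Bool) : List (Int × Int) :=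
  (PySem.List.enumerate forest 0).foldl (fun visible rt =>
    let row := rt.1
    let trees := rt.2
    let n : Int := trees.length
    let left := ((PySem.List.enumerate trees 0).filter
      (fun ct => decide (ct.2 > pyMaxNe ((-1) :: PySem.List.slice trees none (some ct.1))))).map
      (fun ct => ct.1)
    let right := ((PySem.List.enumerate trees.reverse 0).filter
      (fun ct => decide (ct.2 > pyMaxNe ((-1) :: PySem.List.slice trees (some (n - ct.1)) none)))).map
      (fun ct => n - ct.1 - 1)
    (left ++ right).foldl (fun (V : PySem.Set (Int × Int)) col => V.add (visible_tree row col swap)) visible)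
    PySem.Set.empty

-- ===== PRECONDITION & SPEC =====
def Spec_find_visible_in_rows (forest : List (List Int)) (swap : Bool) (out : List (Int × Int)) : Prop := out = find_visible_in_rows_alt forest swap
instance (forest : List (List Int)) (swap : Bool) (out : List (Int × Int)) : Decidable (Spec_find_visible_in_rows forest swap out) := by unfold Spec_find_visible_in_rows; infer_instance

-- ===== CLAIM (what is proved, stated in full; the proofs are below) =====
def Claim_equal_find_visible_in_rows : Prop := ∀ (forest : List (List Int)) (swap : Bool), Dom_find_visible_in_rows forest swap → Spec_find_visible_in_rows forest swap (find_visible_in_rows forest swap)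

-- ===== LEMMAS AND PROOFS =====

lemma foldl_max_start (t : List Int) : ∀ (d h : Int),
    t.foldl max (max d h) = max (t.foldl max d) h := by
  induction t with
  | nil => intro d h; rfl
  | cons x t ih =>
    intro d h
    simp only [List.foldl]
    rw [max_right_comm d h x, ih]

lemma foldl_max_reverse (xs : List Int) : ∀ (d : Int),
    xs.reverse.foldl max d = xs.foldl max d := by
  induction xs with
  | nil => intro d; rfl
  | cons h t ih =>
    intro d
    simp only [List.reverse_cons, List.foldl_append, List.foldl, ih]
    rw [← foldl_max_start]

/-- A's stateful running-max visibility scan over a suffix `ts` of `ts0` equals the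
stateless pass that compares each tree against `b` applied to its index, provided `b`
computes the prefix-max (floored at -1) of `ts0`. -/
lemma scan_eq (g : Int → Int × Int) (ts0 : List Int) (b : Int → Int)
    (hb : ∀ k : Nat, k ≤ ts0.length → b (k : Int) = (ts0.take k).foldl max (-1)) :
    ∀ (ts pre : List Int) (V : PySem.Set (Int × Int)), ts0 = pre ++ ts →
    ((PySem.List.enumerate ts (pre.length : Int)).foldl
      (fun (st : Int × PySem.Set (Int × Int)) ct =>
        if ct.2 > st.1 then (ct.2, st.2.add (g ct.1)) else st)
      (pre.foldl max (-1), V)).2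
    = (PySem.List.enumerate ts (pre.length : Int)).foldl
        (fun V ct => if ct.2 > b ct.1 then V.add (g ct.1) else V) V := by
  intro ts
  induction ts with
  | nil => intro pre V _; simp [PySem.List.enumerate_nil]
  | cons h t ih =>
    intro pre V hsplit
    have hlen : pre.length ≤ ts0.length := by
      subst hsplit; simp
    have hbpre : b (pre.length : Int) = pre.foldl max (-1) := by
      rw [hb pre.length hlen, hsplit, List.take_left]
    have hstate : (if h > pre.foldl max (-1) then h else pre.foldl max (-1))
        = (pre ++ [h]).foldl max (-1) := by
      rw [List.foldl_append]
      simp only [List.foldl_cons, List.foldl_nil]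
      omega
    have hsplit' : ts0 = (pre ++ [h]) ++ t := by simp [hsplit]
    have hlen' : ((pre ++ [h]).length : Int) = (pre.length : Int) + 1 := by
      simp
    rw [PySem.List.enumerate_cons]
    simp only [List.foldl_cons, hbpre]
    by_cases hc : h > pre.foldl max (-1)
    · simp only [if_pos hc]
      have := ih (pre ++ [h]) (V.add (g (pre.length : Int))) hsplit'
      rw [hlen', ← hstate] at this
      simp only [if_pos hc] at this
      exact this
    · simp only [if_neg hc]
      have := ih (pre ++ [h]) V hsplit'
      rw [hlen', ← hstate] at this
      simp only [if_neg hc] at this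
      exact this

/-- The left-pass bound of B is the prefix max of the row, floored at -1. -/
lemma left_bound (trees : List Int) (k : Nat) (_ : k ≤ trees.length) :
    pyMaxNe ((-1) :: PySem.List.slice trees none (some (k : Int)))
      = (trees.take k).foldl max (-1) := by
  rw [pyMaxNe, PySem.List.slice_to_natCast, PySem.List.max?_id_cons]
  rfl

/-- The right-pass bound of B is the prefix max of the reversed row, floored at -1. -/
lemma right_bound (trees : List Int) (k : Nat) (hk : k ≤ trees.length) :
    pyMaxNe ((-1) :: PySem.List.slice trees (some ((trees.length : Int) - (k : Int))) none)
      = (trees.reverse.take k).foldl max (-1) := by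
  have h0 : (0 : Int) ≤ (trees.length : Int) - (k : Int) := by omega
  rw [pyMaxNe, PySem.List.slice_from trees h0, PySem.List.max?_id_cons]
  have htn : ((trees.length : Int) - (k : Int)).toNat = trees.length - k := by omega
  have : (trees.drop (trees.length - k)).foldl max (-1)
      = (trees.reverse.take k).foldl max (-1) := by
    rw [← foldl_max_reverse (trees.drop (trees.length - k)), List.reverse_drop]
    congr 2
    omega
  simp only [Option.getD_some, htn]
  exact this

/-- Fold of set-adds over B's filtered/mapped column list equals the conditional fold. -/
lemma fold_filter_map {γ : Type} (l : List (Int × Int)) (p : Int × Int → Bool)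
    (f : Int × Int → Int) (F : γ → Int → γ) (V : γ) :
    ((l.filter p).map f).foldl F V
      = l.foldl (fun V ct => if p ct then F V (f ct) else V) V := by
  rw [List.foldl_map, ← PySem.List.foldl_if_eq_foldl_filter]

-- ===== VERDICT (by name: the statement is the Claim_ definition above) =====
theorem find_visible_in_rows_spec : Claim_equal_find_visible_in_rows := by
  unfold Claim_equal_find_visible_in_rows
  intro forest swap _
  unfold Spec_find_visible_in_rows find_visible_in_rows find_visible_in_rows_alt
  congr 1
  funext visible rt
  simp only [List.foldl_append, fold_filter_map, decide_eq_true_eq]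
  have L := scan_eq (fun c => visible_tree rt.1 c swap) rt.2
      (fun i => pyMaxNe ((-1) :: PySem.List.slice rt.2 none (some i)))
      (fun k _hk => left_bound rt.2 k _hk) rt.2 [] visible rfl
  simp only [List.length_nil, Nat.cast_zero, List.foldl_nil] at L
  rw [L]
  have R := scan_eq (fun c => visible_tree rt.1 ((rt.2.length : Int) - c - 1) swap) rt.2.reverse
      (fun i => pyMaxNe ((-1) :: PySem.List.slice rt.2 (some ((rt.2.length : Int) - i)) none))
      (fun k hk => right_bound rt.2 k (by simpa using hk)) rt.2.reverse []
      ((PySem.List.enumerate rt.2 0).foldl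
        (fun (V : PySem.Set (Int × Int)) ct =>
          if ct.2 > pyMaxNe ((-1) :: PySem.List.slice rt.2 none (some ct.1))
          then V.add (visible_tree rt.1 ct.1 swap) else V) visible) rfl
  simp only [List.length_nil, Nat.cast_zero, List.foldl_nil] at R
  rw [R]
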